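-- pv_equiv track=rewrite | github.com/madisonareabusadvocates/stage | update_mobile_nav.py | adjust_paths
-- ===== SOURCE A (Python) =====
-- def adjust_paths(nav_html, depth):
--     """Adjust navigation paths based on directory depth."""
--     if depth == 0:
--         return nav_html  # Root level, no changes needed
--
--     # Add ../ for each directory level
--     prefix = '../' * depth
--
--     # Explicitly update known nav links to avoid double-prefix issues
--     replacements = {
--         'href="index.html"':            f'href="{prefix}index.html"',
--         'href="aboutus.html"':          f'href="{prefix}aboutus.html"',
--         'href="events.html"':           f'href="{prefix}events.html"',
--         'href="positions.html"':        f'href="{prefix}positions.html"',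
--         'href="resolutions.html"':      f'href="{prefix}resolutions.html"',
--         'href="strategic_plan.html"':   f'href="{prefix}strategic_plan.html"',
--         'href="resources.html"':        f'href="{prefix}resources.html"',
--         'href="articles.html"':         f'href="{prefix}articles.html"',
--         'href="blog.html"':             f'href="{prefix}blog.html"',
--         'href="links.html"':            f'href="{prefix}links.html"',
--         'href="news.html"':             f'href="{prefix}news.html"',
--         'href="volunteer.html"':        f'href="{prefix}volunteer.html"',
--         'href="membership.html"':       f'href="{prefix}membership.html"',
--         'href="donate.html"':           f'href="{prefix}donate.html"',
--         'href="Manifesto/manifesto.html"': f'href="{prefix}Manifesto/manifesto.html"',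
--     }
--     for old, new in replacements.items():
--         nav_html = nav_html.replace(old, new)
--
--     return nav_html
-- ===== SOURCE B (Python) =====
-- NAV_NAMES = (
--     'index.html', 'aboutus.html', 'events.html', 'positions.html',
--     'resolutions.html', 'strategic_plan.html', 'resources.html',
--     'articles.html', 'blog.html', 'links.html', 'news.html',
--     'volunteer.html', 'membership.html', 'donate.html',
--     'Manifesto/manifesto.html',
-- )
--
--
-- def adjust_paths(nav_html, depth):
--     """Adjust navigation paths based on directory depth."""
--     if depth == 0:
--         return nav_html  # Root level, no changes needed
--
--     prefix = '../' * depth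
--
--     # Single left-to-right pass: at each position, if one of the known
--     # nav tokens starts here, emit it with the prefix inserted and skip
--     # past it; otherwise copy one character.
--     out = []
--     i = 0
--     n = len(nav_html)
--     while i < n:
--         for name in NAV_NAMES:
--             token = 'href="' + name + '"'
--             if nav_html.startswith(token, i):
--                 out.append('href="' + prefix + name + '"')
--                 i += len(token)
--                 break
--         else:
--             out.append(nav_html[i])
--             i += 1
--     return ''.join(out)
-- ===== Notes on version B (the rewrite author's own statement) =====
-- stated objective: alternative
-- what changed: A runs fifteen sequential full-string str.replace passes, one per known nav link; B makes a single left-to-right pass over the HTML, at each position trying the fifteen known href tokens (first match wins) and emitting the prefixed token or copying one character.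
import Mathlib
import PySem

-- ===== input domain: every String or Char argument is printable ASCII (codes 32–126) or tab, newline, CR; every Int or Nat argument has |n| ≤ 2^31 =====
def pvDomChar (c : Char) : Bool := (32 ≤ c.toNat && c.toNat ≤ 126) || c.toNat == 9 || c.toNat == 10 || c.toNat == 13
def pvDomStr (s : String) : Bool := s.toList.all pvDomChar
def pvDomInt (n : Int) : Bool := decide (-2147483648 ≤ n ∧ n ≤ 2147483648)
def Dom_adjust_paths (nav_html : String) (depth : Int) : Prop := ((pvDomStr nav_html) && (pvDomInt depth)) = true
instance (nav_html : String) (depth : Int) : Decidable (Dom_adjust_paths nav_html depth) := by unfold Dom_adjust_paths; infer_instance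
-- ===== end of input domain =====

-- B replaces A's fifteen sequential full-string .replace passes by one left-to-right
-- scan with a first-match lookup over the fifteen known tokens (objective: alternative).

-- ===== PORT A =====
def adjust_paths (nav_html : String) (depth : Int) : String :=
  if depth = 0 then nav_html
  else
    let pfx := String.ofList (PySem.List.pyRepeat "../".toList depth)
    let replacements : List (String × String) := [
      ("href=\"index.html\"", "href=\"" ++ pfx ++ "index.html\""),
      ("href=\"aboutus.html\"", "href=\"" ++ pfx ++ "aboutus.html\""),
      ("href=\"events.html\"", "href=\"" ++ pfx ++ "events.html\""),
      ("href=\"positions.html\"", "href=\"" ++ pfx ++ "positions.html\""),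
      ("href=\"resolutions.html\"", "href=\"" ++ pfx ++ "resolutions.html\""),
      ("href=\"strategic_plan.html\"", "href=\"" ++ pfx ++ "strategic_plan.html\""),
      ("href=\"resources.html\"", "href=\"" ++ pfx ++ "resources.html\""),
      ("href=\"articles.html\"", "href=\"" ++ pfx ++ "articles.html\""),
      ("href=\"blog.html\"", "href=\"" ++ pfx ++ "blog.html\""),
      ("href=\"links.html\"", "href=\"" ++ pfx ++ "links.html\""),
      ("href=\"news.html\"", "href=\"" ++ pfx ++ "news.html\""),
      ("href=\"volunteer.html\"", "href=\"" ++ pfx ++ "volunteer.html\""),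
      ("href=\"membership.html\"", "href=\"" ++ pfx ++ "membership.html\""),
      ("href=\"donate.html\"", "href=\"" ++ pfx ++ "donate.html\""),
      ("href=\"Manifesto/manifesto.html\"", "href=\"" ++ pfx ++ "Manifesto/manifesto.html\"")]
    replacements.foldl (fun s p => PySem.Str.replace s p.1 p.2) nav_html

-- ===== PORT B =====
-- Source B's NAV_NAMES tuple
def pvNames : List (List Char) := [
  ['i','n','d','e','x','.','h','t','m','l'],
  ['a','b','o','u','t','u','s','.','h','t','m','l'],
  ['e','v','e','n','t','s','.','h','t','m','l'],
  ['p','o','s','i','t','i','o','n','s','.','h','t','m','l'],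
  ['r','e','s','o','l','u','t','i','o','n','s','.','h','t','m','l'],
  ['s','t','r','a','t','e','g','i','c','_','p','l','a','n','.','h','t','m','l'],
  ['r','e','s','o','u','r','c','e','s','.','h','t','m','l'],
  ['a','r','t','i','c','l','e','s','.','h','t','m','l'],
  ['b','l','o','g','.','h','t','m','l'],
  ['l','i','n','k','s','.','h','t','m','l'],
  ['n','e','w','s','.','h','t','m','l'],
  ['v','o','l','u','n','t','e','e','r','.','h','t','m','l'],
  ['m','e','m','b','e','r','s','h','i','p','.','h','t','m','l'],
  ['d','o','n','a','t','e','.','h','t','m','l'],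
  ['M','a','n','i','f','e','s','t','o','/','m','a','n','i','f','e','s','t','o','.','h','t','m','l']]

-- the chars of 'href="'
def pvH : List Char := ['h','r','e','f','=','"']
-- token = 'href="' + name + '"'
def pvTok (n : List Char) : List Char := pvH ++ n ++ ['"']
-- replacement emitted for a matched token: 'href="' + prefix + name + '"'
def pvRep (pre n : List Char) : List Char := pvH ++ pre ++ n ++ ['"']

-- Source B's while loop: one pass over the remaining suffix; the for/break over the
-- names is the first-match `find?`.
def pvScan (pre : List Char) (names : List (List Char)) : List Char → List Char
  | [] => []
  | c :: t =>
    match names.find? (fun n => (pvTok n).isPrefixOf (c :: t)) with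
    | some n => pvRep pre n ++ pvScan pre names (List.drop (pvTok n).length (c :: t))
    | none => c :: pvScan pre names t
termination_by s => s.length
decreasing_by
  all_goals simp [pvTok, pvH]

def adjust_paths_alt (nav_html : String) (depth : Int) : String :=
  if depth = 0 then nav_html
  else
    String.ofList (pvScan (PySem.List.pyRepeat "../".toList depth) pvNames nav_html.toList)

-- ===== PRECONDITION & SPEC =====
def Spec_adjust_paths (nav_html : String) (depth : Int) (out : String) : Prop := out = adjust_paths_alt nav_html depth
instance (nav_html : String) (depth : Int) (out : String) : Decidable (Spec_adjust_paths nav_html depth out) := by unfold Spec_adjust_paths; infer_instance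

-- ===== CLAIM (what is proved, stated in full; the proofs are below) =====
def Claim_equal_adjust_paths : Prop := ∀ (nav_html : String) (depth : Int), Dom_adjust_paths nav_html depth → Spec_adjust_paths nav_html depth (adjust_paths nav_html depth)

-- ===== LEMMAS AND PROOFS =====

-- single-pattern left-to-right scan (the shape of Python str.replace with nonempty pattern)
def pvSrep (a : Char) (ps r : List Char) : List Char → List Char
  | [] => []
  | c :: t =>
    if (a :: ps).isPrefixOf (c :: t) then r ++ pvSrep a ps r (List.drop ps.length t)
    else c :: pvSrep a ps r t
termination_by s => s.length
decreasing_by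
  all_goals simp

-- a "good" name: nonempty, free of '"' and '=', not starting with '.' or '/'
def pvGood (n : List Char) : Prop :=
  n ≠ [] ∧ (∀ c ∈ n, c ≠ '"' ∧ c ≠ '=') ∧ n[0]? ≠ some '.' ∧ n[0]? ≠ some '/'

def pvGoodPre (pre : List Char) : Prop := ∀ c ∈ pre, c = '.' ∨ c = '/'

theorem pvNames_good : ∀ n ∈ pvNames, pvGood n := by simp [pvNames, pvGood]

-- ===== PySem.Chars.replace = pvSrep =====

theorem pv_go_eq (a : Char) (ps r : List Char) :
    ∀ (fuel : Nat) (l acc : List Char), l.length ≤ fuel →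
      PySem.Chars.replace.go (a :: ps) r fuel l acc = acc.reverse ++ pvSrep a ps r l := by
  intro fuel
  induction fuel with
  | zero =>
    intro l acc h
    have : l = [] := by cases l <;> simp_all
    subst this
    simp [PySem.Chars.replace.go, pvSrep]
  | succ fuel ih =>
    intro l acc h
    cases l with
    | nil => simp [PySem.Chars.replace.go, pvSrep]
    | cons c t =>
      by_cases hp : (a :: ps).isPrefixOf (c :: t)
      · rw [show PySem.Chars.replace.go (a :: ps) r (fuel+1) (c :: t) acc
            = PySem.Chars.replace.go (a :: ps) r fuel (List.drop (a :: ps).length (c :: t)) (r.reverse ++ acc) by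
              simp [PySem.Chars.replace.go, hp]]
        rw [ih _ _ (by simp at h ⊢; omega)]
        simp [pvSrep, hp]
      · rw [show PySem.Chars.replace.go (a :: ps) r (fuel+1) (c :: t) acc
            = PySem.Chars.replace.go (a :: ps) r fuel t (c :: acc) by
              simp [PySem.Chars.replace.go, hp]]
        rw [ih _ _ (by simp at h; omega)]
        simp [pvSrep, hp]

theorem pv_replace_eq (a : Char) (ps r s : List Char) :
    PySem.Chars.replace s (a :: ps) r = pvSrep a ps r s := by
  rw [PySem.Chars.replace]
  simp [pv_go_eq a ps r s.length s [] le_rfl]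

-- ===== getElem facts about pvRep / pvTok =====

theorem pvRep_length (pre n : List Char) : (pvRep pre n).length = 7 + pre.length + n.length := by
  simp [pvRep, pvH]; omega

theorem pvTok_length (n : List Char) : (pvTok n).length = 7 + n.length := by
  simp [pvTok, pvH]; omega

theorem pvTok_eq_rep (n : List Char) : pvTok n = pvRep [] n := by simp [pvTok, pvRep]

theorem pvRep_get4 (pre n : List Char) : (pvRep pre n)[4]? = some '=' := by
  simp [pvRep, pvH]

theorem pvRep_get5 (pre n : List Char) : (pvRep pre n)[5]? = some '"' := by
  simp [pvRep, pvH]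

theorem pvRep_get6 (pre n : List Char) (hp : pre ≠ []) : (pvRep pre n)[6]? = pre[0]? := by
  have h6 : (pvH).length ≤ 6 := by simp [pvH]
  rw [pvRep]
  simp only [List.append_assoc]
  rw [List.getElem?_append_right h6]
  have : 0 < pre.length := List.length_pos_iff.mpr hp
  rw [show 6 - pvH.length = 0 by simp [pvH], List.getElem?_append_left this]

theorem pvTok_get6 (n : List Char) (hn : n ≠ []) : (pvTok n)[6]? = n[0]? := by
  have h6 : (pvH).length ≤ 6 := by simp [pvH]
  rw [pvTok]
  simp only [List.append_assoc]
  rw [List.getElem?_append_right h6]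
  have : 0 < n.length := List.length_pos_iff.mpr hn
  rw [show 6 - pvH.length = 0 by simp [pvH], List.getElem?_append_left this]

theorem pvRep_last (pre n : List Char) :
    (pvRep pre n)[6 + pre.length + n.length]? = some '"' := by
  rw [pvRep]
  simp only [List.append_assoc]
  rw [List.getElem?_append_right (by simp [pvH]; omega)]
  rw [List.getElem?_append_right (by simp [pvH]; omega)]
  rw [List.getElem?_append_right (by simp [pvH]; omega)]
  simp only [pvH, List.length_cons, List.length_nil]
  rw [show 6 + pre.length + n.length - (0+1+1+1+1+1+1) - pre.length - n.length = 0 by omega]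
  rfl

theorem pvRep_eqpos (pre n : List Char) (hp : pvGoodPre pre) (hn : pvGood n) {i : Nat}
    (h : (pvRep pre n)[i]? = some '=') : i = 4 := by
  rw [pvRep] at h
  simp only [List.append_assoc] at h
  rcases Nat.lt_or_ge i 6 with h6 | h6
  · rw [List.getElem?_append_left (by simp [pvH]; omega)] at h
    interval_cases i <;> simp_all [pvH]
  · exfalso
    rw [List.getElem?_append_right (by simp [pvH]; omega)] at h
    have hm := List.mem_of_getElem? h
    rcases List.mem_append.mp hm with hm | hm
    · rcases hp _ hm with h' | h' <;> exact absurd h' (by decide)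
    · rcases List.mem_append.mp hm with hm | hm
      · exact ((hn.2.1 _ hm).2 rfl)
      · simp_all

theorem pvRep_qpos (pre n : List Char) (hp : pvGoodPre pre) (hn : pvGood n) {i : Nat}
    (h : (pvRep pre n)[i]? = some '"') : i = 5 ∨ i = 6 + pre.length + n.length := by
  rw [pvRep] at h
  simp only [List.append_assoc] at h
  rcases Nat.lt_or_ge i 6 with h6 | h6
  · rw [List.getElem?_append_left (by simp [pvH]; omega)] at h
    interval_cases i <;> simp_all [pvH]
  · right
    rw [List.getElem?_append_right (by simp [pvH]; omega)] at h
    have hH : pvH.length = 6 := by simp [pvH]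
    rcases Nat.lt_or_ge (i - pvH.length) pre.length with hj | hj
    · exfalso
      rw [List.getElem?_append_left hj] at h
      rcases hp _ (List.mem_of_getElem? h) with h' | h' <;> exact absurd h' (by decide)
    · rw [List.getElem?_append_right hj] at h
      rcases Nat.lt_or_ge (i - pvH.length - pre.length) n.length with hk | hk
      · exact absurd rfl ((hn.2.1 _ (List.mem_of_getElem? (by rw [List.getElem?_append_left hk] at h; exact h))).1)
      · rw [List.getElem?_append_right hk] at h
        have : i - pvH.length - pre.length - n.length = 0 := by
          by_contra hz
          rw [List.getElem?_eq_none_iff.mpr (by simp; omega)] at h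
          simp at h
        omega

-- prefix transfers getElem? (both directions, below the prefix's length)
theorem pv_prefix_get {p x : List Char} (h : p <+: x) {i : Nat} (hi : i < p.length) :
    p[i]? = x[i]? := by
  rcases h with ⟨t, rfl⟩
  exact (List.getElem?_append_left hi).symm

-- ===== the no-occurrence core =====

-- no token starts strictly inside an emitted replacement (nor inside another token
-- past its start)
theorem pv_no_occ {pre m n : List Char} (hp : pvGoodPre pre) (hm : pvGood m) (hn : pvGood n)
    {k : Nat} (hk : k < (pvRep pre m).length) (hk0 : 0 < k ∨ pre ≠ []) (v : List Char) :
    ¬ pvTok n <+: List.drop k (pvRep pre m) ++ v := by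
  intro hpref
  have hwl : (pvRep pre m).length = 7 + pre.length + m.length := pvRep_length pre m
  have htl : (pvTok n).length = 7 + n.length := pvTok_length n
  have hn1 : 1 ≤ n.length := List.length_pos_iff.mpr hn.1
  have heq : ∀ i, i < (pvTok n).length → (pvTok n)[i]? = (List.drop k (pvRep pre m) ++ v)[i]? :=
    fun i hi => pv_prefix_get hpref hi
  have hsm : ∀ i, i < (pvRep pre m).length - k →
      (List.drop k (pvRep pre m) ++ v)[i]? = (pvRep pre m)[k+i]? := by
    intro i hi
    rw [List.getElem?_append_left (by simp [List.length_drop]; omega), List.getElem?_drop]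
  by_cases hcase : 5 ≤ (pvRep pre m).length - k
  · have h4 : (pvRep pre m)[k+4]? = some '=' := by
      rw [← hsm 4 (by omega), ← heq 4 (by omega), pvTok_eq_rep]
      exact pvRep_get4 [] n
    have hk0' : k + 4 = 4 := pvRep_eqpos pre m hp hm h4
    have hk' : k = 0 := by omega
    have hpre' : pre ≠ [] := by
      rcases hk0 with h | h
      · omega
      · exact h
    have hprel : 1 ≤ pre.length := List.length_pos_iff.mpr hpre'
    obtain ⟨c, hc⟩ : ∃ c, n[0]? = some c := by
      cases n with
      | nil => exact absurd rfl hn.1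
      | cons a t => exact ⟨a, rfl⟩
    have h6 : (pvRep pre m)[k+6]? = some c := by
      rw [← hsm 6 (by omega), ← heq 6 (by omega), pvTok_get6 n hn.1]
      exact hc
    rw [hk', pvRep_get6 pre m hpre'] at h6
    obtain ⟨p, pt, rfl⟩ : ∃ p pt, pre = p :: pt := by
      cases pre with
      | nil => exact absurd rfl hpre'
      | cons p pt => exact ⟨p, pt, rfl⟩
    simp only [List.getElem?_cons_zero, Option.some.injEq] at h6
    rcases hp p List.mem_cons_self with h' | h' <;> rw [← h6, h'] at hc
    · exact hn.2.2.1 hc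
    · exact hn.2.2.2 hc
  · have hi0 : (pvRep pre m).length - k - 1 < 4 := by omega
    have hq : (pvTok n)[(pvRep pre m).length - k - 1]? = some '"' := by
      rw [heq _ (by omega), hsm _ (by omega),
        show k + ((pvRep pre m).length - k - 1) = 6 + pre.length + m.length by omega]
      exact pvRep_last pre m
    rw [pvTok_eq_rep] at hq
    rcases pvRep_qpos [] n (by intro c hc; cases hc) hn hq with h' | h' <;> simp at h' <;> omega

-- a nonempty suffix of a token that is a prefix of the scan output is a prefix of the input
theorem pv_occ {pre : List Char} (hp : pvGoodPre pre) (hpre : pre ≠ [])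
    {L : List (List Char)} (hL : ∀ i ∈ L, pvGood i) {n : List Char} (hn : pvGood n) :
    ∀ (s : List Char) {d : Nat}, d < (pvTok n).length →
      List.drop d (pvTok n) <+: pvScan pre L s → List.drop d (pvTok n) <+: s := by
  have hGP0 : pvGoodPre [] := by intro c hc; cases hc
  have htl : (pvTok n).length = 7 + n.length := pvTok_length n
  have hn1 : 1 ≤ n.length := List.length_pos_iff.mpr hn.1
  have hprel : 1 ≤ pre.length := List.length_pos_iff.mpr hpre
  suffices h : ∀ (N : Nat) (s : List Char), s.length ≤ N → ∀ (d : Nat), d < (pvTok n).length →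
      List.drop d (pvTok n) <+: pvScan pre L s → List.drop d (pvTok n) <+: s by
    intro s d hd hp'
    exact h s.length s le_rfl d hd hp'
  intro N
  induction N with
  | zero =>
    intro s hs d hd hp'
    have : s = [] := by cases s <;> simp_all
    subst this
    rw [pvScan] at hp'
    have := List.prefix_nil.mp hp'
    have : (List.drop d (pvTok n)).length = 0 := by rw [this]; rfl
    simp [List.length_drop] at this
    omega
  | succ N ih =>
    intro s hs d hd hp'
    cases s with
    | nil =>
      rw [pvScan] at hp'
      have := List.prefix_nil.mp hp'
      have : (List.drop d (pvTok n)).length = 0 := by rw [this]; rfl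
      simp [List.length_drop] at this
      omega
    | cons c t =>
      cases hfind : L.find? (fun i => (pvTok i).isPrefixOf (c :: t)) with
      | some i =>
        exfalso
        rw [pvScan, hfind] at hp'
        have hiL : i ∈ L := List.mem_of_find?_eq_some hfind
        have hgi : pvGood i := hL i hiL
        have hi1 : 1 ≤ i.length := List.length_pos_iff.mpr hgi.1
        have hwl : (pvRep pre i).length = 7 + pre.length + i.length := pvRep_length pre i
        have hql : (List.drop d (pvTok n)).length = (pvTok n).length - d := by
          simp [List.length_drop]
        have heq : ∀ j, j < (pvTok n).length - d → (pvTok n)[d+j]? = (pvRep pre i ++ pvScan pre L (List.drop (pvTok i).length (c :: t)))[j]? := by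
          intro j hj
          rw [← List.getElem?_drop]
          exact pv_prefix_get hp' (by omega)
        have hw : ∀ j, j < (pvRep pre i).length →
            (pvRep pre i ++ pvScan pre L (List.drop (pvTok i).length (c :: t)))[j]? = (pvRep pre i)[j]? :=
          fun j hj => List.getElem?_append_left hj
        by_cases h6 : 6 ≤ (pvTok n).length - d
        · have h5 : (pvRep [] n)[d+5]? = some '"' := by
            rw [← pvTok_eq_rep, heq 5 (by omega), hw 5 (by omega)]
            exact pvRep_get5 pre i
          rcases pvRep_qpos [] n hGP0 hn h5 with h' | h'
          · have hd0 : d = 0 := by omega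
            subst hd0
            obtain ⟨cn, hcn⟩ : ∃ cn, n[0]? = some cn := by
              cases n with
              | nil => exact absurd rfl hn.1
              | cons a t' => exact ⟨a, rfl⟩
            have hc6 : (pvRep pre i)[6]? = some cn := by
              rw [← hw 6 (by omega), ← heq 6 (by omega)]
              rw [show 0 + 6 = 6 by rfl, pvTok_get6 n hn.1]
              exact hcn
            rw [pvRep_get6 pre i hpre] at hc6
            obtain ⟨p, pt, rfl⟩ : ∃ p pt, pre = p :: pt := by
              cases pre with
              | nil => exact absurd rfl hpre
              | cons p pt => exact ⟨p, pt, rfl⟩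
            simp only [List.getElem?_cons_zero, Option.some.injEq] at hc6
            rcases hp p List.mem_cons_self with h'' | h'' <;> rw [← hc6, h''] at hcn
            · exact hn.2.2.1 hcn
            · exact hn.2.2.2 hcn
          · have hd' : d = n.length + 1 := by simp at h'; omega
            have h4 : (pvRep [] n)[d+4]? = some '=' := by
              rw [← pvTok_eq_rep, heq 4 (by omega), hw 4 (by omega)]
              exact pvRep_get4 pre i
            have := pvRep_eqpos [] n hGP0 hn h4
            omega
        · have hi0 : (pvTok n).length - d - 1 < 5 := by omega
          have hlast : (pvTok n)[d + ((pvTok n).length - d - 1)]? = some '"' := by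
            rw [show d + ((pvTok n).length - d - 1) = 6 + ([] : List Char).length + n.length by simp; omega]
            rw [pvTok_eq_rep]
            exact pvRep_last [] n
          have hq : (pvRep pre i)[(pvTok n).length - d - 1]? = some '"' := by
            rw [← hw _ (by omega), ← heq _ (by omega)]
            exact hlast
          rcases pvRep_qpos pre i hp hgi hq with h' | h' <;> omega
      | none =>
        rw [pvScan, hfind] at hp'
        rw [List.drop_eq_getElem_cons hd] at hp' ⊢
        rw [List.cons_prefix_cons] at hp' ⊢
        obtain ⟨hc, hrest⟩ := hp'
        refine ⟨hc, ?_⟩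
        by_cases hd1 : d + 1 < (pvTok n).length
        · exact ih t (by simp at hs; omega) (d+1) hd1 hrest
        · have hnil : List.drop (d+1) (pvTok n) = [] := List.drop_eq_nil_of_le (by omega)
          rw [hnil]
          exact List.nil_prefix

-- ===== append lemmas =====

theorem pvSrep_append (a : Char) (ps r : List Char) (u v : List Char)
    (h : ∀ k < u.length, ¬ (a :: ps) <+: List.drop k u ++ v) :
    pvSrep a ps r (u ++ v) = u ++ pvSrep a ps r v := by
  induction u with
  | nil => simp
  | cons x u' ih =>
    have h0 : ¬ (a :: ps) <+: x :: u' ++ v := by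
      have := h 0 (by simp)
      simpa using this
    rw [List.cons_append, pvSrep, if_neg (by rw [List.isPrefixOf_iff_prefix]; exact h0)]
    rw [ih (fun k hk => by
      have := h (k+1) (by simp; omega)
      simpa using this)]
    simp

theorem pvScan_append (pre : List Char) (L : List (List Char)) (u v : List Char)
    (h : ∀ k < u.length, ∀ i ∈ L, ¬ pvTok i <+: List.drop k u ++ v) :
    pvScan pre L (u ++ v) = u ++ pvScan pre L v := by
  induction u with
  | nil => simp
  | cons x u' ih =>
    have hnone : L.find? (fun i => (pvTok i).isPrefixOf (x :: (u' ++ v))) = none := by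
      rw [List.find?_eq_none]
      intro i hiL
      rw [Bool.not_eq_true, ← Bool.not_eq_true, List.isPrefixOf_iff_prefix]
      have := h 0 (by simp) i hiL
      simpa using this
    rw [List.cons_append, pvScan, hnone]
    rw [ih (fun k hk i hiL => by
      have := h (k+1) (by simp; omega) i hiL
      simpa using this)]
    simp

-- ===== the main fold step =====

def pvTokTl (n : List Char) : List Char := ['r','e','f','=','"'] ++ n ++ ['"']

theorem pvTok_cons (n : List Char) : pvTok n = 'h' :: pvTokTl n := rfl

theorem pv_main {pre : List Char} (hp : pvGoodPre pre) (hpre : pre ≠ [])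
    {L : List (List Char)} (hL : ∀ i ∈ L, pvGood i) {n : List Char} (hn : pvGood n) :
    ∀ (s : List Char),
      pvSrep 'h' (pvTokTl n) (pvRep pre n) (pvScan pre L s) = pvScan pre (L ++ [n]) s := by
  suffices h : ∀ (N : Nat) (s : List Char), s.length ≤ N →
      pvSrep 'h' (pvTokTl n) (pvRep pre n) (pvScan pre L s) = pvScan pre (L ++ [n]) s by
    intro s
    exact h s.length s le_rfl
  intro N
  induction N with
  | zero =>
    intro s hs
    have : s = [] := by cases s <;> simp_all
    subst this
    rw [pvScan, pvScan, pvSrep]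
  | succ N ih =>
    intro s hs
    cases s with
    | nil => rw [pvScan, pvScan, pvSrep]
    | cons c t =>
      cases hfind : L.find? (fun i => (pvTok i).isPrefixOf (c :: t)) with
      | some i =>
        have hiL : i ∈ L := List.mem_of_find?_eq_some hfind
        have hfind' : (L ++ [n]).find? (fun i => (pvTok i).isPrefixOf (c :: t)) = some i := by
          rw [List.find?_append, hfind]; rfl
        rw [pvScan, hfind, pvScan, hfind']
        rw [pvSrep_append 'h' (pvTokTl n) (pvRep pre n) _ _ (fun k hk => by
          rw [← pvTok_cons]
          exact pv_no_occ hp (hL i hiL) hn hk (Or.inr hpre) _)]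
        congr 1
        exact ih _ (by simp [pvTok_length]; simp at hs; omega)
      | none =>
        have hnoL : ∀ i ∈ L, ¬ (pvTok i).isPrefixOf (c :: t) := by
          intro i hiL
          have := List.find?_eq_none.mp hfind i hiL
          simpa using this
        by_cases htokn : (pvTok n).isPrefixOf (c :: t)
        · have hfind' : (L ++ [n]).find? (fun i => (pvTok i).isPrefixOf (c :: t)) = some n := by
            rw [List.find?_append, hfind]
            simp [htokn]
          have hpfx : pvTok n <+: c :: t := List.isPrefixOf_iff_prefix.mp htokn
          have hsplit : pvTok n ++ List.drop (pvTok n).length (c :: t) = c :: t :=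
            List.prefix_iff_eq_append.mp hpfx
          have hGP0 : pvGoodPre [] := by intro x hx; cases hx
          have hL1 : pvScan pre L (c :: t) = pvTok n ++ pvScan pre L (List.drop (pvTok n).length (c :: t)) := by
            conv_lhs => rw [← hsplit]
            refine pvScan_append pre L _ _ (fun k hk i hiL => ?_)
            rcases Nat.eq_zero_or_pos k with rfl | hkpos
            · intro hcontra
              apply hnoL i hiL
              rw [List.isPrefixOf_iff_prefix]
              simpa [hsplit] using hcontra
            · have hk' : k < (pvRep [] n).length := by
                rwa [← pvTok_eq_rep]
              rw [pvTok_eq_rep]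
              exact pv_no_occ hGP0 hn (hL i hiL) hk' (Or.inl hkpos) _
          conv_rhs => rw [pvScan, hfind']
          rw [hL1, pvTok_cons, List.cons_append, pvSrep,
            if_pos (by rw [← List.cons_append, List.isPrefixOf_iff_prefix]; exact List.prefix_append _ _)]
          rw [List.drop_left]
          congr 1
          exact ih _ (by simp; simp at hs; omega)
        · have hfind' : (L ++ [n]).find? (fun i => (pvTok i).isPrefixOf (c :: t)) = none := by
            rw [List.find?_append, hfind]
            simp [htokn]
          rw [pvScan, hfind, pvScan, hfind']
          have hnp : ¬ (pvTok n) <+: c :: pvScan pre L t := by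
            intro hcontra
            have hscan : c :: pvScan pre L t = pvScan pre L (c :: t) := by rw [pvScan, hfind]
            rw [hscan] at hcontra
            have := pv_occ hp hpre hL hn (c :: t) (d := 0) (by simp [pvTok_length]) (by simpa using hcontra)
            simp at this
            exact htokn (List.isPrefixOf_iff_prefix.mpr this)
          rw [pvSrep, if_neg (by rw [List.isPrefixOf_iff_prefix, ← pvTok_cons]; exact hnp)]
          congr 1
          exact ih t (by simp at hs; omega)

theorem pv_fold {pre : List Char} (hp : pvGoodPre pre) (hpre : pre ≠ []) :
    ∀ (NS : List (List Char)), (∀ n ∈ NS, pvGood n) →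
      ∀ (L : List (List Char)), (∀ i ∈ L, pvGood i) → ∀ (s : List Char),
      NS.foldl (fun acc n => pvSrep 'h' (pvTokTl n) (pvRep pre n) acc) (pvScan pre L s)
        = pvScan pre (L ++ NS) s := by
  intro NS
  induction NS with
  | nil => intro _ L _ s; simp
  | cons n NS ih =>
    intro hNS L hLg s
    rw [List.foldl_cons, pv_main hp hpre hLg (hNS n List.mem_cons_self) s]
    rw [ih (fun m hm => hNS m (List.mem_cons_of_mem _ hm)) (L ++ [n])
      (by intro i hi; rcases List.mem_append.mp hi with h | h
          · exact hLg i h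
          · have : i = n := by simpa using h
            subst this
            exact hNS i List.mem_cons_self) s]
    simp

theorem pvScan_nil_names (pre : List Char) : ∀ s, pvScan pre [] s = s := by
  intro s
  induction s with
  | nil => rw [pvScan]
  | cons c t ih => rw [pvScan, List.find?_nil, ih]

-- ===== identity lemmas for the empty prefix (depth < 0) =====

theorem pvSrep_id (a : Char) (ps : List Char) : ∀ s, pvSrep a ps (a :: ps) s = s := by
  suffices h : ∀ (N : Nat) (s : List Char), s.length ≤ N → pvSrep a ps (a :: ps) s = s by
    intro s; exact h s.length s le_rfl
  intro N
  induction N with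
  | zero =>
    intro s hs
    have : s = [] := by cases s <;> simp_all
    subst this; rw [pvSrep]
  | succ N ih =>
    intro s hs
    cases s with
    | nil => rw [pvSrep]
    | cons c t =>
      by_cases hpfx : (a :: ps).isPrefixOf (c :: t)
      · rw [pvSrep, if_pos hpfx]
        have hsplit : (a :: ps) ++ List.drop (a :: ps).length (c :: t) = c :: t :=
          List.prefix_iff_eq_append.mp (List.isPrefixOf_iff_prefix.mp hpfx)
        conv_rhs => rw [← hsplit]
        congr 1
        have := ih (List.drop (a :: ps).length (c :: t)) (by simp at hs ⊢; omega)
        simpa using this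
      · rw [pvSrep, if_neg hpfx, ih t (by simp at hs; omega)]

theorem pvScan_id (names : List (List Char)) : ∀ s, pvScan [] names s = s := by
  suffices h : ∀ (N : Nat) (s : List Char), s.length ≤ N → pvScan [] names s = s by
    intro s; exact h s.length s le_rfl
  intro N
  induction N with
  | zero =>
    intro s hs
    have : s = [] := by cases s <;> simp_all
    subst this; rw [pvScan]
  | succ N ih =>
    intro s hs
    cases s with
    | nil => rw [pvScan]
    | cons c t =>
      cases hfind : names.find? (fun i => (pvTok i).isPrefixOf (c :: t)) with
      | some i =>
        rw [pvScan, hfind]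
        have hpfx : (pvTok i).isPrefixOf (c :: t) = true := by
          simpa using List.find?_some hfind
        have hsplit : pvTok i ++ List.drop (pvTok i).length (c :: t) = c :: t :=
          List.prefix_iff_eq_append.mp (List.isPrefixOf_iff_prefix.mp hpfx)
        conv_rhs => rw [← hsplit]
        rw [ih _ (by have hti := pvTok_length i; simp at hs ⊢; omega)]
        show _ = pvTok i ++ List.drop (pvTok i).length (c :: t)
        simp only [pvRep, pvTok, List.append_nil, List.nil_append, List.append_assoc,
          List.cons_append, List.append_cancel_left_eq]
        congr 1
        exact ih _ (by simp [pvH] at hs ⊢; omega)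
      | none => rw [pvScan, hfind, ih t (by simp at hs; omega)]

-- ===== assembling the two sides =====

theorem pv_foldl_toList (ps : List (String × String)) (s : String) :
    (ps.foldl (fun s p => PySem.Str.replace s p.1 p.2) s).toList
      = (ps.map (fun p => (p.1.toList, p.2.toList))).foldl
          (fun cs p => PySem.Chars.replace cs p.1 p.2) s.toList := by
  induction ps generalizing s with
  | nil => simp
  | cons p ps ih =>
    rw [List.foldl_cons, List.map_cons, List.foldl_cons, ih, PySem.Str.toList_replace]

theorem pv_goodPre_repeat (d : Int) : pvGoodPre (PySem.List.pyRepeat "../".toList d) := by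
  intro c hc
  simp only [PySem.List.pyRepeat, List.mem_flatten] at hc
  obtain ⟨l, hl, hcl⟩ := hc
  rw [List.eq_of_mem_replicate hl] at hcl
  have : "../".toList = ['.', '.', '/'] := by decide
  rw [this] at hcl
  simp only [List.mem_cons, List.not_mem_nil, or_false] at hcl
  rcases hcl with h | h | h
  · exact Or.inl h
  · exact Or.inl h
  · exact Or.inr h

theorem pv_srep_fold_id : ∀ (NS : List (List Char)) (cs : List Char),
    NS.foldl (fun cs n => pvSrep 'h' (pvTokTl n) (pvRep [] n) cs) cs = cs := by
  intro NS
  induction NS with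
  | nil => intro cs; rfl
  | cons n NS ih =>
    intro cs
    rw [List.foldl_cons, show pvRep [] n = 'h' :: pvTokTl n from by rw [← pvTok_eq_rep, pvTok_cons]]
    rw [pvSrep_id, ih]

theorem pv_A_eq_B (nav : String) (d : Int) : adjust_paths nav d = adjust_paths_alt nav d := by
  by_cases hd : d = 0
  · simp only [adjust_paths, adjust_paths_alt, if_pos hd]
  · simp only [adjust_paths, adjust_paths_alt, if_neg hd]
    apply String.toList_inj.mp
    rw [pv_foldl_toList, String.toList_ofList]
    have hmap : ([
      ("href=\"index.html\"", "href=\"" ++ String.ofList (PySem.List.pyRepeat ['.', '.', '/'] d) ++ "index.html\""),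
      ("href=\"aboutus.html\"", "href=\"" ++ String.ofList (PySem.List.pyRepeat ['.', '.', '/'] d) ++ "aboutus.html\""),
      ("href=\"events.html\"", "href=\"" ++ String.ofList (PySem.List.pyRepeat ['.', '.', '/'] d) ++ "events.html\""),
      ("href=\"positions.html\"", "href=\"" ++ String.ofList (PySem.List.pyRepeat ['.', '.', '/'] d) ++ "positions.html\""),
      ("href=\"resolutions.html\"", "href=\"" ++ String.ofList (PySem.List.pyRepeat ['.', '.', '/'] d) ++ "resolutions.html\""),
      ("href=\"strategic_plan.html\"", "href=\"" ++ String.ofList (PySem.List.pyRepeat ['.', '.', '/'] d) ++ "strategic_plan.html\""),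
      ("href=\"resources.html\"", "href=\"" ++ String.ofList (PySem.List.pyRepeat ['.', '.', '/'] d) ++ "resources.html\""),
      ("href=\"articles.html\"", "href=\"" ++ String.ofList (PySem.List.pyRepeat ['.', '.', '/'] d) ++ "articles.html\""),
      ("href=\"blog.html\"", "href=\"" ++ String.ofList (PySem.List.pyRepeat ['.', '.', '/'] d) ++ "blog.html\""),
      ("href=\"links.html\"", "href=\"" ++ String.ofList (PySem.List.pyRepeat ['.', '.', '/'] d) ++ "links.html\""),
      ("href=\"news.html\"", "href=\"" ++ String.ofList (PySem.List.pyRepeat ['.', '.', '/'] d) ++ "news.html\""),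
      ("href=\"volunteer.html\"", "href=\"" ++ String.ofList (PySem.List.pyRepeat ['.', '.', '/'] d) ++ "volunteer.html\""),
      ("href=\"membership.html\"", "href=\"" ++ String.ofList (PySem.List.pyRepeat ['.', '.', '/'] d) ++ "membership.html\""),
      ("href=\"donate.html\"", "href=\"" ++ String.ofList (PySem.List.pyRepeat ['.', '.', '/'] d) ++ "donate.html\""),
      ("href=\"Manifesto/manifesto.html\"", "href=\"" ++ String.ofList (PySem.List.pyRepeat ['.', '.', '/'] d) ++ "Manifesto/manifesto.html\"")
      ].map (fun p => (p.1.toList, p.2.toList)))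
        = pvNames.map (fun n => (pvTok n, pvRep (PySem.List.pyRepeat ['.', '.', '/'] d) n)) := by
      simp [pvNames, pvTok, pvRep, pvH]
    rw [hmap, List.foldl_map]
    have hrepl : (fun (cs : List Char) (n : List Char) =>
        PySem.Chars.replace cs (pvTok n) (pvRep (PySem.List.pyRepeat ['.', '.', '/'] d) n))
        = fun cs n => pvSrep 'h' (pvTokTl n) (pvRep (PySem.List.pyRepeat ['.', '.', '/'] d) n) cs := by
      funext cs n
      rw [pvTok_cons]
      exact pv_replace_eq _ _ _ _
    rw [hrepl]
    rcases lt_trichotomy d 0 with hneg | hzero | hpos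
    · have hpre0 : PySem.List.pyRepeat ['.', '.', '/'] d = [] := by
        simp [PySem.List.pyRepeat, Int.toNat_of_nonpos hneg.le]
      rw [hpre0, pv_srep_fold_id, pvScan_id, String.toList_ofList]
    · exact absurd hzero hd
    · have hpre : PySem.List.pyRepeat ['.', '.', '/'] d ≠ [] := by
        have hk : d.toNat ≠ 0 := by omega
        obtain ⟨k, hk'⟩ : ∃ k, d.toNat = k + 1 := ⟨d.toNat - 1, by omega⟩
        simp [PySem.List.pyRepeat, hk', List.replicate_succ]
      have hgood : pvGoodPre (PySem.List.pyRepeat ['.', '.', '/'] d) := by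
        have hdots : ("../".toList : List Char) = ['.', '.', '/'] := by decide
        rw [← hdots]
        exact pv_goodPre_repeat d
      have := pv_fold hgood hpre pvNames pvNames_good [] (by intro i hi; cases hi) nav.toList
      rw [pvScan_nil_names] at this
      rw [this]
      simp

-- ===== VERDICT (by name: the statement is the Claim_ definition above) =====
theorem adjust_paths_spec : Claim_equal_adjust_paths := by
  intro nav d _
  unfold Spec_adjust_paths
  exact pv_A_eq_B nav d
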